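-- pv_equiv track=rewrite | github.com/achinthagunasekara/puzzles_and_algorithms | question_marks/solution.py | check_questions_marks
-- ===== SOURCE A (Python) =====
-- def check_questions_marks(string):
--     """
--     Check if there is are 3 question marks between two numbers
--     that adds up to 10.
--     Args:
--         string (str): Input string to check.
--     Returns:
--         bool: True if string matches above condition, False otherwise.
--     """
--     num_of_question_marks = 0
--     index_checking_from = None
--     for index, char in enumerate(string):
--         if char.isdigit():
--             index_checking_from = index
--
--             if num_of_question_marks == 3:
--                 return True
--
--             num_of_question_marks = 0
--
--         if index_checking_from is not None and char == "?":
--             num_of_question_marks += 1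
--     return False
-- ===== SOURCE B (Python) =====
-- def _first_digit(s):
--     """Index of the first digit character of s, or None."""
--     return next((i for i, c in enumerate(s) if c.isdigit()), None)
--
--
-- def check_questions_marks(string):
--     """Gap-based rewrite: jump from digit to digit and test whether the
--     slice between two consecutive digits contains exactly three '?'."""
--     k = _first_digit(string)
--     if k is None:
--         return False
--     s = string[k + 1:]
--     while True:
--         j = _first_digit(s)
--         if j is None:
--             return False
--         if s[:j].count('?') == 3:
--             return True
--         s = s[j + 1:]
-- ===== Notes on version B (the rewrite author's own statement) =====
-- stated objective: alternative
-- what changed: Replaces A's per-character state machine (running counter plus seen-digit flag) with a gap-based scan that jumps from digit to digit and tests whether the slice between consecutive digits contains exactly three question marks.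
import Mathlib
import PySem

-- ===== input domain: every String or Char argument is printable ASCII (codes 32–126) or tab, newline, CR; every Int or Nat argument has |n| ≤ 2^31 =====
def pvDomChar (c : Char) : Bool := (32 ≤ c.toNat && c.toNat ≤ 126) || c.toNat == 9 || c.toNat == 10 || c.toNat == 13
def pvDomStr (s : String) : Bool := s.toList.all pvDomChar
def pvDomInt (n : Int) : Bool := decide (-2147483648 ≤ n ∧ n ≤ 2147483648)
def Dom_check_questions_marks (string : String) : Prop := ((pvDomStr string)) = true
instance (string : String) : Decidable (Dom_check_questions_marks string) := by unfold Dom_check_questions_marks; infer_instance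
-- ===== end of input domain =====

-- B replaces A's per-character counter state machine by a gap-based scan (jump to next digit,
-- counts question marks in the slice between consecutive digits); same cost, different decomposition.

-- ===== PORT A =====
-- the loop of A: state = (index, num_of_question_marks, index_checking_from);
-- Char.isDigit is exact for Python str.isdigit on the ASCII domain
def goA : List Char → Int → Int → Option Int → Bool
  | [], _, _, _ => false
  | c :: rest, i, num, icf =>
    if c.isDigit then
      -- index_checking_from = index; early return when counter == 3; else counter resets to 0
      if num == 3 then true
      else goA rest (i + 1) (if (Option.some i).isSome && c == '?' then 0 + 1 else 0) (some i)
    else goA rest (i + 1) (if icf.isSome && c == '?' then num + 1 else num) icf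

def check_questions_marks (string : String) : Bool :=
  goA string.toList 0 0 none

-- ===== PORT B =====
-- _first_digit(s) = next((i for i, c in enumerate(s) if c.isdigit()), None)  ≙  List.findIdx?
-- the while loop of B; s[:j] = take j and s[j+1:] = drop (j+1) are exact for these
-- nonnegative in-range indices
def goB (cs : List Char) : Bool :=
  match h : cs.findIdx? Char.isDigit with
  | none => false
  | some j => if (cs.take j).count '?' == 3 then true else goB (cs.drop (j + 1))
termination_by cs.length
decreasing_by
  cases cs with
  | nil => simp [List.findIdx?, List.findIdx?.go] at h
  | cons a l => simp only [List.length_drop, List.length_cons]; omega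

def check_questions_marks_alt (string : String) : Bool :=
  match string.toList.findIdx? Char.isDigit with
  | none => false
  | some k => goB (string.toList.drop (k + 1))

-- ===== PRECONDITION & SPEC =====
def Spec_check_questions_marks (string : String) (out : Bool) : Prop := out = check_questions_marks_alt string
instance (string : String) (out : Bool) : Decidable (Spec_check_questions_marks string out) := by unfold Spec_check_questions_marks; infer_instance

-- ===== CLAIM (what is proved, stated in full; the proofs are below) =====
def Claim_equal_check_questions_marks : Prop := ∀ (string : String), Dom_check_questions_marks string → Spec_check_questions_marks string (check_questions_marks string)

-- ===== LEMMAS AND PROOFS =====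

-- once a digit has been seen, A's loop no longer depends on the index or the stored position
def goA' : List Char → Int → Bool
  | [], _ => false
  | c :: rest, num =>
    if c.isDigit then (if num == 3 then true else goA' rest 0)
    else goA' rest (if c == '?' then num + 1 else num)

theorem digit_ne_q (c : Char) (h : c.isDigit = true) : (c == '?') = false := by
  cases hq : c == '?' with
  | false => rfl
  | true =>
    have : c = '?' := by exact beq_iff_eq.mp hq
    subst this
    simp [Char.isDigit] at h

theorem goA_some (cs : List Char) : ∀ (i num a : Int),
    goA cs i num (some a) = goA' cs num := by
  induction cs with
  | nil => intro i num a; rfl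
  | cons c rest ih =>
    intro i num a
    by_cases hd : c.isDigit
    · simp [goA, goA', hd, digit_ne_q c hd, ih]
    · simp [goA, goA', hd, ih]

theorem goA_none (cs : List Char) : ∀ (i : Int),
    goA cs i 0 none =
      match cs.findIdx? Char.isDigit with
      | none => false
      | some k => goA' (cs.drop (k + 1)) 0 := by
  induction cs with
  | nil => intro i; rfl
  | cons c rest ih =>
    intro i
    by_cases hd : c.isDigit
    · simp [goA, hd, digit_ne_q c hd, List.findIdx?_cons, goA_some]
    · simp only [goA, hd, if_false, Option.isSome_none, Bool.false_and, ih,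
        List.findIdx?_cons, Bool.false_eq_true]
      cases hf : rest.findIdx? Char.isDigit with
      | none => simp
      | some k => simp [List.drop_succ_cons]

-- unfold goB once, through its dependent match
theorem goB_eq (cs : List Char) :
    goB cs =
      match cs.findIdx? Char.isDigit with
      | none => false
      | some j => if (cs.take j).count '?' == 3 then true else goB (cs.drop (j + 1)) := by
  rw [goB.eq_def]
  cases hf : cs.findIdx? Char.isDigit <;> simp

theorem goA'_matchform (cs : List Char) : ∀ (num : Int),
    goA' cs num =
      match cs.findIdx? Char.isDigit with
      | none => false
      | some j => if num + ((cs.take j).count '?' : Int) == 3 then true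
                  else goB (cs.drop (j + 1)) := by
  induction cs with
  | nil => intro num; rfl
  | cons c rest ih =>
    intro num
    by_cases hd : c.isDigit
    · have hz : goA' rest 0 = goB rest := by
        rw [ih 0, goB_eq rest]
        cases hf : rest.findIdx? Char.isDigit with
        | none => rfl
        | some j =>
          simp only
          have : ((0 + ((rest.take j).count '?' : Int) == 3)) =
              (((rest.take j).count '?' == 3)) := by
            rw [Bool.eq_iff_iff]
            simp only [beq_iff_eq]
            omega
          rw [this]
      simp [goA', hd, List.findIdx?_cons, hz]
    · simp only [goA', hd, Bool.false_eq_true, reduceIte, ih, List.findIdx?_cons]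
      cases hf : rest.findIdx? Char.isDigit with
      | none => simp
      | some j =>
        simp only [Option.map_some, List.drop_succ_cons, List.take_succ_cons,
          List.count_cons]
        have : ((num + (((rest.take j).count '?' + if c == '?' then 1 else 0 : Nat) : Int)) == 3) =
            (((if c == '?' then num + 1 else num) + ((rest.take j).count '?' : Int)) == 3) := by
          cases hq : c == '?' <;>
            (rw [Bool.eq_iff_iff]; simp only [beq_iff_eq, if_true, if_false, Bool.false_eq_true]) <;>
            push_cast <;> omega
        rw [this]

-- ===== VERDICT (by name: the statement is the Claim_ definition above) =====
theorem check_questions_marks_spec : Claim_equal_check_questions_marks := by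
  intro s _
  unfold Spec_check_questions_marks check_questions_marks check_questions_marks_alt
  rw [goA_none]
  cases hf : s.toList.findIdx? Char.isDigit with
  | none => rfl
  | some k =>
    simp only
    rw [goA'_matchform, goB_eq]
    cases hf2 : (s.toList.drop (k + 1)).findIdx? Char.isDigit with
    | none => rfl
    | some j =>
      simp only
      have : ((0 + (((s.toList.drop (k + 1)).take j).count '?' : Int) == 3)) =
          ((((s.toList.drop (k + 1)).take j).count '?' == 3)) := by
        rw [Bool.eq_iff_iff]; simp only [beq_iff_eq]; omega
      rw [this]
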